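-- pv_equiv track=rewrite | github.com/gustavoem/my_masters_scripts | posterior_distribution_test/bioinformatics/plot_girolami_simulation_by_t_data.py | get_n_sample_from_each_iteration
-- ===== SOURCE A (Python) =====
-- def get_n_sample_from_each_iteration (sample, n):
--     ans = []
--     current_it = sample[0][1]
--     for i in range (len (sample)):
--         if current_it == sample[i][1]:
--             continue
--         if current_it < sample[i][1]:
--             back_idx = i - n - 1
--             front_idx = i - 1
--             ans += sample[back_idx:front_idx]
--             current_it = sample[i][1]
--     ans += sample[-n:]
--     return ans
-- ===== SOURCE B (Python) =====
-- def get_n_sample_from_each_iteration(sample, n):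
--     # Inclusive prefix maxima: m[i] = max iteration value among sample[:i+1].
--     m = []
--     for _, v in sample:
--         m.append(v if not m or v > m[-1] else m[-1])
--     # A slice is emitted exactly where the running maximum strictly increases,
--     # i.e. where two adjacent prefix maxima differ.
--     ans = []
--     i = 1
--     for prev, curmax in zip(m, m[1:]):
--         if curmax > prev:
--             ans += sample[i - n - 1:i - 1]
--         i += 1
--     ans += sample[-n:]
--     return ans
-- ===== Notes on version B (the rewrite author's own statement) =====
-- stated objective: alternative
-- what changed: B replaces A's stateful current_it loop (equality/less-than branches updating a running value while slicing inline) by a prefix-maximum scan: it first computes the inclusive prefix maxima of the iteration values, then emits the sample[i-n-1:i-1] slice exactly where two adjacent prefix maxima differ.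
import Mathlib
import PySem

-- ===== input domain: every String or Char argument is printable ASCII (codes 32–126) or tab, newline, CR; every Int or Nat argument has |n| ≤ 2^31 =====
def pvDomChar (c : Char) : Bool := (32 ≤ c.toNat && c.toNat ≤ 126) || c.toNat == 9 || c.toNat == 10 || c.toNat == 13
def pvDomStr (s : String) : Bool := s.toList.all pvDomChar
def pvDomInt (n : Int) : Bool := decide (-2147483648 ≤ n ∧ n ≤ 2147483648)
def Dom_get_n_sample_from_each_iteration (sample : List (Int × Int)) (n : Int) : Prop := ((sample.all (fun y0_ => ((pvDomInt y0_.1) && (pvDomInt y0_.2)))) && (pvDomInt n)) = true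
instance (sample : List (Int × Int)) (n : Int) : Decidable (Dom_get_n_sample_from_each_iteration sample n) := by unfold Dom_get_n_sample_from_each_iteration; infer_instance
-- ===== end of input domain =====

-- B replaces A's stateful current_it loop by a prefix-maximum scan: it first computes the
-- inclusive prefix maxima of the iteration values, then emits a slice wherever two adjacent
-- prefix maxima differ (alternative decomposition, same cost). Proved equal to A on all
-- non-empty inputs (A raises IndexError on [], where B returns []).

-- ===== PORT A =====
-- A's for-loop over range(len(sample)): traversal with the running index i,
-- state (ans, current_it); sample[i][1] is the current element's second component.
def pvA_loop (full : List (Int × Int)) (n : Int) :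
    List (Int × Int) → Nat → List (Int × Int) → Int → List (Int × Int) × Int
  | [], _, ans, cur => (ans, cur)
  | v :: rest, i, ans, cur =>
    if cur == v.2 then pvA_loop full n rest (i+1) ans cur
    else if cur < v.2 then
      pvA_loop full n rest (i+1)
        (ans ++ PySem.List.slice full (some ((i : Int) - n - 1)) (some ((i : Int) - 1))) v.2
    else pvA_loop full n rest (i+1) ans cur

def get_n_sample_from_each_iteration (sample : List (Int × Int)) (n : Int) : List (Int × Int) :=
  match sample with
  | [] => []   -- Python raises IndexError here; excluded by Pre_
  | v0 :: _ =>
    (pvA_loop sample n sample 0 [] v0.2).1 ++ PySem.List.slice sample (some (-n)) none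

-- ===== PORT B =====
-- first pass of B: m.append(v if not m or v > m[-1] else m[-1])  — inclusive prefix maxima
def pvB_m (xs : List (Int × Int)) : List Int :=
  xs.foldl (fun m v =>
    m ++ [match m.getLast? with
          | none => v.2
          | some last => if v.2 > last then v.2 else last]) []

-- second pass of B: for prev, curmax in zip(m, m[1:]) with running index i starting at 1
def get_n_sample_from_each_iteration_alt (sample : List (Int × Int)) (n : Int) : List (Int × Int) :=
  let m := pvB_m sample
  let st := (m.zip m.tail).foldl
    (fun (st : List (Int × Int) × Int) p =>
      (if p.2 > p.1 then
         st.1 ++ PySem.List.slice sample (some (st.2 - n - 1)) (some (st.2 - 1))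
       else st.1,
       st.2 + 1))
    ([], 1)
  st.1 ++ PySem.List.slice sample (some (-n)) none

-- ===== PRECONDITION & SPEC =====
-- A evaluates sample[0], which raises IndexError on the empty list.
def Pre_get_n_sample_from_each_iteration (sample : List (Int × Int)) (n : Int) : Prop :=
  sample ≠ []
instance (sample : List (Int × Int)) (n : Int) : Decidable (Pre_get_n_sample_from_each_iteration sample n) := by unfold Pre_get_n_sample_from_each_iteration; infer_instance
def pvWitness_get_n_sample_from_each_iteration : (List (Int × Int)) × Int := ([(0, 0), (1, 1)], 1)

def Spec_get_n_sample_from_each_iteration (sample : List (Int × Int)) (n : Int) (out : List (Int × Int)) : Prop := out = get_n_sample_from_each_iteration_alt sample n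
instance (sample : List (Int × Int)) (n : Int) (out : List (Int × Int)) : Decidable (Spec_get_n_sample_from_each_iteration sample n out) := by unfold Spec_get_n_sample_from_each_iteration; infer_instance

-- ===== CLAIM (what is proved, stated in full; the proofs are below) =====
def Claim_equal_get_n_sample_from_each_iteration : Prop := ∀ (sample : List (Int × Int)) (n : Int), Dom_get_n_sample_from_each_iteration sample n → Pre_get_n_sample_from_each_iteration sample n → Spec_get_n_sample_from_each_iteration sample n (get_n_sample_from_each_iteration sample n)

-- ===== LEMMAS AND PROOFS =====

-- proof-only helper: the boundary indices (positions where the running maximum strictly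
-- increases), the common description both ports are reduced to
def pvBounds : List (Int × Int) → Int → Int → List Int
  | [], _, _ => []
  | v :: rest, i, cur =>
    if v.2 > cur then i :: pvBounds rest (i+1) v.2
    else pvBounds rest (i+1) cur

-- proof-only helper: the prefix-maximum scan from a seed
def pvScanMax : Int → List (Int × Int) → List Int
  | _, [] => []
  | c, v :: rest => (if v.2 > c then v.2 else c) :: pvScanMax (if v.2 > c then v.2 else c) rest

-- A's loop accumulates exactly the slices at the boundary indices
theorem pvA_loop_eq_bounds (full : List (Int × Int)) (n : Int) :
    ∀ (rest : List (Int × Int)) (i : Nat) (ans : List (Int × Int)) (cur : Int),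
    (pvA_loop full n rest i ans cur).1 =
      ans ++ ((pvBounds rest (i : Int) cur).map
        (fun b => PySem.List.slice full (some (b - n - 1)) (some (b - 1)))).flatten := by
  intro rest
  induction rest with
  | nil => intro i ans cur; simp [pvA_loop, pvBounds]
  | cons v rest ih =>
    intro i ans cur
    by_cases h1 : cur = v.2
    · have h2 : ¬ v.2 > cur := by omega
      simp [pvA_loop, pvBounds, h1, ih]
    · by_cases h2 : cur < v.2
      · have h3 : v.2 > cur := h2
        simp [pvA_loop, pvBounds, h1, h2, ih]
      · have h3 : ¬ v.2 > cur := h2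
        simp [pvA_loop, pvBounds, h1, h2, ih]

-- B's first pass builds the prefix-maximum scan
theorem pvB_m_fold (xs : List (Int × Int)) :
    ∀ (a : List Int) (c : Int), a.getLast? = some c →
    xs.foldl (fun m v =>
      m ++ [match m.getLast? with
            | none => v.2
            | some last => if v.2 > last then v.2 else last]) a
      = a ++ pvScanMax c xs := by
  induction xs with
  | nil => intro a c _; simp [pvScanMax]
  | cons v rest ih =>
    intro a c hlast
    have hne : a ≠ [] := by intro h; simp [h] at hlast
    simp only [List.foldl_cons, hlast, pvScanMax]
    rw [ih (a ++ [if v.2 > c then v.2 else c]) (if v.2 > c then v.2 else c) (by simp)]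
    simp

theorem pvB_m_cons (v0 : Int × Int) (rest : List (Int × Int)) :
    pvB_m (v0 :: rest) = v0.2 :: pvScanMax v0.2 rest := by
  unfold pvB_m
  simp only [List.foldl_cons, List.getLast?_nil, List.nil_append]
  rw [pvB_m_fold rest [v0.2] v0.2 (by simp)]
  simp

-- B's second pass over zip (c :: scan) scan accumulates the slices at the boundary indices
theorem pvB_fold_eq_bounds (full : List (Int × Int)) (n : Int) :
    ∀ (rest : List (Int × Int)) (c : Int) (i0 : Int) (acc : List (Int × Int)),
    (((( c :: pvScanMax c rest).zip (pvScanMax c rest)).foldl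
      (fun (st : List (Int × Int) × Int) p =>
        (if p.2 > p.1 then
           st.1 ++ PySem.List.slice full (some (st.2 - n - 1)) (some (st.2 - 1))
         else st.1,
         st.2 + 1))
      (acc, i0)).1)
    = acc ++ ((pvBounds rest i0 c).map
        (fun b => PySem.List.slice full (some (b - n - 1)) (some (b - 1)))).flatten := by
  intro rest
  induction rest with
  | nil => intro c i0 acc; simp [pvScanMax, pvBounds]
  | cons v rest ih =>
    intro c i0 acc
    by_cases h : v.2 > c
    · simp only [pvScanMax, pvBounds, if_pos h, List.zip_cons_cons, List.foldl_cons]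
      rw [ih v.2 (i0 + 1)]
      simp
    · have hc : (if v.2 > c then v.2 else c) = c := by simp [h]
      simp only [pvScanMax, pvBounds, hc, if_neg h, List.zip_cons_cons, List.foldl_cons]
      rw [ih c (i0 + 1)]
      simp

-- ===== VERDICT (by name: the statement is the Claim_ definition above) =====
theorem get_n_sample_from_each_iteration_spec : Claim_equal_get_n_sample_from_each_iteration := by
  intro sample n _ hpre
  unfold Spec_get_n_sample_from_each_iteration
  match sample with
  | [] => exact absurd rfl hpre
  | v0 :: rest =>
    show get_n_sample_from_each_iteration (v0 :: rest) n
        = get_n_sample_from_each_iteration_alt (v0 :: rest) n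
    unfold get_n_sample_from_each_iteration get_n_sample_from_each_iteration_alt
    rw [pvB_m_cons]
    have hA := pvA_loop_eq_bounds (v0 :: rest) n (v0 :: rest) 0 [] v0.2
    have hB := pvB_fold_eq_bounds (v0 :: rest) n rest v0.2 1 []
    simp only [List.tail_cons]
    rw [hB, hA]
    have hbb : pvBounds (v0 :: rest) 0 v0.2 = pvBounds rest 1 v0.2 := by
      simp [pvBounds]
    simp only [Nat.cast_zero, hbb]
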